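-- pv_equiv track=rewrite | github.com/RahulRJJaiswal/BasicProgrammingPython | basicProgramming/armstrongNumber.py | get_sum_of_nth_powers
-- ===== SOURCE A (Python) =====
-- def get_sum_of_nth_powers(p_num):
--     v_num_digit = len(str(p_num))
--     total = 0
--
--     while p_num > 0:
--         v_digit = p_num % 10
--         total = total + (v_digit ** v_num_digit)
--         p_num = p_num // 10  # int(p_num / 10) it is also same
--
--     return total
-- ===== SOURCE B (Python) =====
-- def get_sum_of_nth_powers(p_num):
--     if p_num <= 0:
--         return 0
--     s = str(p_num)
--     n = len(s)
--     return sum(int(c) ** n for c in s)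
-- ===== Notes on version B (the rewrite author's own statement) =====
-- stated objective: idiomatic
-- what changed: Replaces the modulo-and-floor-division digit-peeling while-loop with a single str() conversion, taking the power from the string length and summing int(c)**n over the digit characters (guarding non-positive inputs, where A's loop never runs, with an early return 0).
import Mathlib
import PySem

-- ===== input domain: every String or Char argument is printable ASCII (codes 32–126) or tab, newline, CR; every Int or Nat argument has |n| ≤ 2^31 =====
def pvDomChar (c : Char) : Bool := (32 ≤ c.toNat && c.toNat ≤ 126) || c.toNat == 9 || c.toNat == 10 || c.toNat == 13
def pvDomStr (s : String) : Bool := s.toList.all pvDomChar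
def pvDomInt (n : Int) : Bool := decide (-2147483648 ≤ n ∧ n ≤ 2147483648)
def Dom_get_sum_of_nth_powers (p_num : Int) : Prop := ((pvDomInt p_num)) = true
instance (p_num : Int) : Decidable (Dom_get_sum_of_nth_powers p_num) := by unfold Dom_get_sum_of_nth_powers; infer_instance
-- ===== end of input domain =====

-- B replaces A's modulo/floor-division digit-peeling loop by one str() conversion and a sum of
-- int(c)**len(s) over the digit characters (idiomatic; return value proved equal everywhere).

-- ===== PORT A =====
-- the while-loop of A: state (p_num, total); exponent v_num_digit is fixed during the loop
def pvLoopA (k : Nat) (p total : Int) : Int :=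
  if _h : p > 0 then
    pvLoopA k (PySem.Int.floordiv p 10) (total + (PySem.Int.mod p 10) ^ k)
  else total
termination_by p.toNat
decreasing_by
  have h1 : PySem.Int.floordiv p 10 = p / 10 := PySem.Int.floordiv_eq_ediv_of_pos (by omega)
  rw [h1]; omega

def get_sum_of_nth_powers (p_num : Int) : Int :=
  -- v_num_digit = len(str(p_num)); Python's ** with this always-positive int exponent is ^ on toNat
  let v_num_digit := PySem.Str.len (PySem.Int.toStr p_num)
  pvLoopA v_num_digit.toNat p_num 0

-- ===== PORT B =====
def get_sum_of_nth_powers_alt (p_num : Int) : Int :=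
  if p_num ≤ 0 then 0
  else
    let s := PySem.Int.toStr p_num
    let n := PySem.Str.len s
    -- int(c) = PySem.Int.ofChars? [c]; on str(p_num) with p_num > 0 every c is an ASCII digit, so it always succeeds
    (s.toList.map (fun c => ((PySem.Int.ofChars? [c]).getD 0) ^ n.toNat)).sum

-- ===== PRECONDITION & SPEC =====
def Spec_get_sum_of_nth_powers (p_num : Int) (out : Int) : Prop := out = get_sum_of_nth_powers_alt p_num
instance (p_num : Int) (out : Int) : Decidable (Spec_get_sum_of_nth_powers p_num out) := by unfold Spec_get_sum_of_nth_powers; infer_instance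

-- ===== CLAIM (what is proved, stated in full; the proofs are below) =====
def Claim_equal_get_sum_of_nth_powers : Prop := ∀ (p_num : Int), Dom_get_sum_of_nth_powers p_num → Spec_get_sum_of_nth_powers p_num (get_sum_of_nth_powers p_num)

-- ===== LEMMAS AND PROOFS =====

-- the common digit-power sum both programs compute, as a recursion on the Nat value
def pvG (k : Nat) (n : Nat) : Int :=
  if n < 10 then ((n : Int)) ^ k
  else ((n % 10 : Nat) : Int) ^ k + pvG k (n / 10)
termination_by n
decreasing_by exact Nat.div_lt_self (by omega) (by norm_num)

-- B's per-character summand, over a char list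
def pvS (k : Nat) (cs : List Char) : Int :=
  (cs.map (fun c => ((PySem.Int.ofChars? [c]).getD 0) ^ k)).sum

lemma pvS_append (k : Nat) (l1 l2 : List Char) : pvS k (l1 ++ l2) = pvS k l1 + pvS k l2 := by
  simp [pvS]

lemma ofChars_digitChar (d : Nat) (hd : d < 10) :
    (PySem.Int.ofChars? [Nat.digitChar d]).getD 0 = (d : Int) := by
  interval_cases d <;> decide

lemma toDigitsCore_acc (f : Nat) : ∀ (n : Nat) (l : List Char),
    Nat.toDigitsCore 10 f n l = Nat.toDigitsCore 10 f n [] ++ l := by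
  induction f with
  | zero => intro n l; simp [Nat.toDigitsCore]
  | succ f ih =>
    intro n l
    simp only [Nat.toDigitsCore]
    by_cases h : n / 10 = 0
    · simp [h]
    · simp only [h]
      rw [ih (n / 10) [(n % 10).digitChar], ih (n / 10) ((n % 10).digitChar :: l)]
      simp

lemma pvS_toDigitsCore (k f : Nat) : ∀ n : Nat, n < f →
    pvS k (Nat.toDigitsCore 10 f n []) = pvG k n := by
  induction f with
  | zero => omega
  | succ f ih =>
    intro n hn
    simp only [Nat.toDigitsCore]
    by_cases h : n / 10 = 0
    · have hlt : n < 10 := by omega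
      have hm : n % 10 = n := Nat.mod_eq_of_lt hlt
      simp [h, pvS, hm, ofChars_digitChar n hlt, pvG, hlt]
    · have hlt : ¬ n < 10 := by omega
      rw [if_neg h, toDigitsCore_acc, pvS_append]
      rw [ih (n / 10) (by omega)]
      have : pvS k [(n % 10).digitChar] = ((n % 10 : Nat) : Int) ^ k := by
        simp [pvS, ofChars_digitChar (n % 10) (Nat.mod_lt _ (by norm_num))]
      rw [this]
      conv_rhs => rw [pvG]
      rw [if_neg hlt]
      ring

lemma pvLoopA_eq_pvG (k : Nat) : ∀ (m : Nat), 0 < m → ∀ total : Int,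
    pvLoopA k (m : Int) total = total + pvG k m := by
  intro m
  induction m using Nat.strong_induction_on with
  | _ m ih =>
    intro hm total
    rw [pvLoopA, dif_pos (by exact_mod_cast hm)]
    rw [show PySem.Int.floordiv (m : Int) 10 = ((m / 10 : Nat) : Int) from by
          exact_mod_cast PySem.Int.floordiv_natCast m 10,
        show PySem.Int.mod (m : Int) 10 = ((m % 10 : Nat) : Int) from by
          exact_mod_cast PySem.Int.mod_natCast m 10]
    by_cases h : m < 10
    · have h0 : m / 10 = 0 := Nat.div_eq_of_lt h
      have hm10 : m % 10 = m := Nat.mod_eq_of_lt h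
      rw [h0, hm10]
      rw [pvLoopA, dif_neg (by norm_num)]
      rw [pvG, if_pos h]
    · have hpos : 0 < m / 10 := Nat.div_pos (by omega) (by norm_num)
      rw [ih (m / 10) (Nat.div_lt_self (by omega) (by norm_num)) hpos]
      conv_rhs => rw [pvG]
      rw [if_neg h]
      ring

lemma pvLoopA_nonpos (k : Nat) (p : Int) (hp : ¬ p > 0) : pvLoopA k p 0 = 0 := by
  rw [pvLoopA, dif_neg hp]

-- ===== VERDICT (by name: the statement is the Claim_ definition above) =====
theorem get_sum_of_nth_powers_spec : Claim_equal_get_sum_of_nth_powers := by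
  intro p _hd
  unfold Spec_get_sum_of_nth_powers get_sum_of_nth_powers get_sum_of_nth_powers_alt
  by_cases hp : p ≤ 0
  · simp only [if_pos hp]
    exact pvLoopA_nonpos _ p (by omega)
  · rw [if_neg hp]
    have hp0 : 0 < p := by omega
    show pvLoopA (PySem.Str.len (PySem.Int.toStr p)).toNat p 0
       = ((PySem.Int.toStr p).toList.map
           (fun c => ((PySem.Int.ofChars? [c]).getD 0) ^ (PySem.Str.len (PySem.Int.toStr p)).toNat)).sum
    generalize (PySem.Str.len (PySem.Int.toStr p)).toNat = k
    have hchars : (PySem.Int.toStr p).toList = Nat.toDigits 10 p.toNat := by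
      rw [PySem.Int.toList_toStr, PySem.Int.toChars, if_neg (by omega)]
    have hB : (((PySem.Int.toStr p).toList.map
        (fun c => ((PySem.Int.ofChars? [c]).getD 0) ^ k)).sum) = pvG k p.toNat := by
      show pvS k ((PySem.Int.toStr p).toList) = pvG k p.toNat
      rw [hchars]
      exact pvS_toDigitsCore k (p.toNat + 1) p.toNat (by omega)
    rw [hB]
    have h2 := pvLoopA_eq_pvG k p.toNat (by omega) 0
    rw [show ((p.toNat : Int)) = p from Int.toNat_of_nonneg (by omega)] at h2
    simpa using h2
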